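-- pv_equiv track=rewrite | github.com/parkjbdev/Algorithm | Programmers/131127_할인 행사/main.py | solution
-- ===== SOURCE A (Python) =====
-- from collections import defaultdict
--
-- def solution(want, number, discount):
--     answer = 0
--     discount_cnt = defaultdict(int)
--
--     for i in range(10):
--         discount_cnt[discount[i]] += 1
--
--     for i in range(len(discount) - 9):
--         for wanted_item, wanted_cnt in zip(want, number):
--             if discount_cnt[wanted_item] < wanted_cnt:
--                 break
--         else: answer += 1
--         if i + 10 >= len(discount): break
--
--         discount_cnt[discount[i]] -= 1
--         discount_cnt[discount[i + 10]] += 1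
--
--     return answer
-- ===== SOURCE B (Python) =====
-- def solution(want, number, discount):
--     if len(discount) < 10:
--         raise IndexError("discount must cover at least 10 days")
--     answer = 0
--     for i in range(len(discount) - 9):
--         window = {}
--         for item in discount[i:i + 10]:
--             window[item] = window.get(item, 0) + 1
--         if all(window.get(w, 0) >= n for w, n in zip(want, number)):
--             answer += 1
--     return answer
-- ===== Notes on version B (the rewrite author's own statement) =====
-- stated objective: simpler
-- what changed: B drops A's rolling defaultdict counter with its decrement/increment and break bookkeeping: after validating that discount covers 10 days (where A's eager indexing raises IndexError), it rebuilds a fresh per-window count dict from the slice discount[i:i+10] for each window and tests it with all(...) over zip(want, number).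
import Mathlib
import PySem

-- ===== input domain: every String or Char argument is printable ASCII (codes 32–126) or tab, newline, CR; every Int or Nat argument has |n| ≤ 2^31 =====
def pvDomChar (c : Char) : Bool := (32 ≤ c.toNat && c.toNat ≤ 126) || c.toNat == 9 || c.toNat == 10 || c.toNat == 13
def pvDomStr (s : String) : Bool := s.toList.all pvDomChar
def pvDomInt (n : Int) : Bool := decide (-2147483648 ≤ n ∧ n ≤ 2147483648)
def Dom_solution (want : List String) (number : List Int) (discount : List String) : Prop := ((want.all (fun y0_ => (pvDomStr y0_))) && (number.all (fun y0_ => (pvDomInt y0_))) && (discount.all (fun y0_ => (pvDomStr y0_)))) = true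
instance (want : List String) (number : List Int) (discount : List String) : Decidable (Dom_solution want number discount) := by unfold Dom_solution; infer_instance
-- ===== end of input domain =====

-- B rebuilds a fresh per-window count dict for each window instead of A's rolling counter with break bookkeeping; A=B proved for len(discount) ≥ 10 (A raises IndexError below that).


-- ===== PORT A =====
-- inner 'for wanted_item, wanted_cnt in zip(want, number): if discount_cnt[wanted_item] < wanted_cnt: break / else: answer += 1'
-- (a defaultdict(int) lookup is value-wise getD _ 0; the zero entries it inserts never change any looked-up value)
def checkA (cnt : PySem.Dict String Int) : List (String × Int) → Bool
  | [] => true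
  | (w, n) :: rest => if cnt.getD w 0 < n then false else checkA cnt rest

-- the second for-loop of A: per index, the zip check, the 'if i + 10 >= len(discount): break', then the -=1/+=1 rolling updates
def loopA (discount : List String) (pairs : List (String × Int)) :
    List Int → Int → PySem.Dict String Int → Int
  | [], answer, _ => answer
  | i :: rest, answer, cnt =>
    if (discount.length : Int) ≤ i + 10 then
      (if checkA cnt pairs then answer + 1 else answer)
    else
      loopA discount pairs rest (if checkA cnt pairs then answer + 1 else answer)
        ((cnt.modify (PySem.List.pyGetD discount i "") 0 (· - 1)).modify
          (PySem.List.pyGetD discount (i + 10) "") 0 (· + 1))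

def solution (want : List String) (number : List Int) (discount : List String) : Int :=
  let cnt := (PySem.List.pyRange 0 10 1).foldl
      (fun d i => d.modify (PySem.List.pyGetD discount i "") 0 (· + 1)) PySem.Dict.empty
  loopA discount (want.zip number) (PySem.List.pyRange 0 ((discount.length : Int) - 9) 1) 0 cnt

-- ===== PORT B =====
-- 'window.get(w, 0) >= n' for one zipped pair
def n_le_getD (window : PySem.Dict String Int) (p : String × Int) : Bool :=
  p.2 ≤ window.getD p.1 0

-- B's 'if len(discount) < 10: raise IndexError' is exactly the region Pre_solution excludes (raising
-- inputs carry no port value); B's zip check is 'all(window.get(w, 0) >= n for w, n in zip(want, number))'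
def solution_alt (want : List String) (number : List Int) (discount : List String) : Int :=
  (PySem.List.pyRange 0 ((discount.length : Int) - 9) 1).foldl
    (fun answer i =>
      let window := (PySem.List.slice discount (some i) (some (i + 10))).foldl
          (fun d item => d.insert item (d.getD item 0 + 1)) PySem.Dict.empty
      if (want.zip number).all (fun p => n_le_getD window p) then answer + 1 else answer) 0

-- ===== PRECONDITION & SPEC =====
-- A eagerly indexes discount[0..9], so it raises IndexError exactly when len(discount) < 10; Pre_ excludes only those inputs.
def Pre_solution (want : List String) (number : List Int) (discount : List String) : Prop :=
  10 ≤ discount.length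
instance (want : List String) (number : List Int) (discount : List String) : Decidable (Pre_solution want number discount) := by unfold Pre_solution; infer_instance

def pvWitness_solution : List String × List Int × List String :=
  (["a"], [1], ["a", "b", "a", "a", "a", "a", "a", "a", "a", "a"])

def Spec_solution (want : List String) (number : List Int) (discount : List String) (out : Int) : Prop := out = solution_alt want number discount
instance (want : List String) (number : List Int) (discount : List String) (out : Int) : Decidable (Spec_solution want number discount out) := by unfold Spec_solution; infer_instance

-- ===== CLAIM (what is proved, stated in full; the proofs are below) =====
def Claim_equal_solution : Prop := ∀ (want : List String) (number : List Int) (discount : List String), Dom_solution want number discount → Pre_solution want number discount → Spec_solution want number discount (solution want number discount)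

-- ===== LEMMAS AND PROOFS =====

-- A's break loop computes B's all(...) whenever every lookup agrees
lemma check_congr (c1 c2 : PySem.Dict String Int)
    (h : ∀ k, c1.getD k 0 = c2.getD k 0) :
    ∀ pairs, checkA c1 pairs = pairs.all (fun p => n_le_getD c2 p) := by
  intro pairs
  induction pairs with
  | nil => rfl
  | cons p rest ih =>
    cases p with | mk w n =>
      simp only [checkA, List.all_cons, n_le_getD, h w, ih]
      by_cases hlt : c2.getD w 0 < n
      · rw [if_pos hlt]
        simp [show ¬ (n ≤ c2.getD w 0) from by omega]
      · rw [if_neg hlt]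
        simp [show n ≤ c2.getD w 0 from by omega]

-- B's fold body, named for the main induction (defeq to the lambda in solution_alt)
def stepB (discount : List String) (pairs : List (String × Int)) (answer i : Int) : Int :=
  let window := (PySem.List.slice discount (some i) (some (i + 10))).foldl
      (fun d item => d.insert item (d.getD item 0 + 1)) PySem.Dict.empty
  if pairs.all (fun p => n_le_getD window p) then answer + 1 else answer

lemma map_pyGetD_pyRange_take (xs : List String) (d : String) (n : Nat) (h : n ≤ xs.length) :
    (PySem.List.pyRange 0 (n : Int) 1).map (fun j => PySem.List.pyGetD xs j d) = xs.take n := by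
  induction n with
  | zero => simp [PySem.List.pyRange_one_eq_nil (by omega : (0 : Int) ≤ 0)]
  | succ m ih =>
    have hc : ((m + 1 : Nat) : Int) = (m : Int) + 1 := by push_cast; ring
    rw [hc, PySem.List.pyRange_one_succ_right (by omega : (0 : Int) ≤ (m : Int)),
      List.map_append, ih (by omega)]
    have hm : m < xs.length := by omega
    rw [List.map_cons, List.map_nil, PySem.List.pyGetD_natCast, List.take_add_one,
      List.getElem?_eq_getElem hm]
    simp [List.getD_eq_getElem?_getD, List.getElem?_eq_getElem hm]

-- initial counter of A = counts of the first window
lemma initA_getD (discount : List String) (h : 10 ≤ discount.length) (k : String) :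
    ((PySem.List.pyRange 0 10 1).foldl
        (fun d i => d.modify (PySem.List.pyGetD discount i "") 0 (· + 1))
        PySem.Dict.empty).getD k 0
      = ((discount.take 10).count k : Int) := by
  have e10 : (PySem.List.pyRange 0 10 1) = (PySem.List.pyRange 0 ((10 : Nat) : Int) 1) := by
    norm_num
  rw [e10, ← List.foldl_map (f := fun j => PySem.List.pyGetD discount j "")
      (g := fun d x => PySem.Dict.modify d x 0 (· + 1)),
    map_pyGetD_pyRange_take discount "" 10 h, PySem.Dict.getD_foldl_modify_add_one]
  simp

-- rolling window identity on list counts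
lemma window_roll (xs : List String) (i : Nat) (h : i + 10 < xs.length) (k : String) :
    (((xs.drop (i + 1)).take 10).count k : Int)
      = (((xs.drop i).take 10).count k : Int)
        - (if xs[i]'(by omega) = k then 1 else 0)
        + (if xs[i + 10]'(by omega) = k then 1 else 0) := by
  have hd : xs.drop i = xs[i]'(by omega) :: xs.drop (i + 1) := by
    rw [List.drop_eq_getElem_cons (by omega)]
  have h9 : (xs.drop (i + 1))[9]'(by simp; omega) = xs[i + 10]'(by omega) := by
    simp [List.getElem_drop]
  have hA : (xs.drop i).take 10 = xs[i]'(by omega) :: (xs.drop (i + 1)).take 9 := by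
    rw [hd]; rfl
  have hB : (xs.drop (i + 1)).take 10
      = (xs.drop (i + 1)).take 9 ++ [xs[i + 10]'(by omega)] := by
    have h910 : (xs.drop (i + 1)).take (9 + 1)
        = (xs.drop (i + 1)).take 9 ++ ((xs.drop (i + 1))[9]?).toList := List.take_add_one
    simpa [List.getElem?_eq_getElem (show 9 < (xs.drop (i + 1)).length by simp; omega), h9]
      using h910
  rw [hA, hB]
  simp only [List.count_append, List.count_cons, List.count_nil]
  by_cases h1 : xs[i]'(by omega) = k <;> by_cases h2 : xs[i + 10]'(by omega) = k <;>
    simp [h1, h2]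

-- the two dict updates of A's rolling step, as arithmetic on lookups
lemma modify2_getD (cnt : PySem.Dict String Int) (a b k : String) :
    (((cnt.modify a 0 (· - 1)).modify b 0 (· + 1)).getD k 0)
      = cnt.getD k 0 - (if a = k then 1 else 0) + (if b = k then 1 else 0) := by
  by_cases hb : k = b
  · subst hb
    rw [PySem.Dict.getD_modify_self]
    by_cases ha : k = a
    · subst ha
      rw [PySem.Dict.getD_modify_self]
      simp
    · rw [PySem.Dict.getD_modify_of_ne _ 0 _ ha]
      simp [show ¬(a = k) from fun h => ha h.symm]
  · rw [PySem.Dict.getD_modify_of_ne _ 0 _ hb]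
    by_cases ha : k = a
    · subst ha
      rw [PySem.Dict.getD_modify_self]
      simp [show ¬(b = k) from fun h => hb h.symm]
    · rw [PySem.Dict.getD_modify_of_ne _ 0 _ ha]
      simp [show ¬(a = k) from fun h => ha h.symm, show ¬(b = k) from fun h => hb h.symm]

-- one rolling update of A's counter preserves the window-count invariant
lemma roll_getD (cnt : PySem.Dict String Int) (discount : List String) (i : Nat)
    (h : i + 10 < discount.length)
    (hc : ∀ k, cnt.getD k 0 = (((discount.drop i).take 10).count k : Int)) (k : String) :
    (((cnt.modify (PySem.List.pyGetD discount (i : Int) "") 0 (· - 1)).modify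
        (PySem.List.pyGetD discount ((i : Int) + 10) "") 0 (· + 1)).getD k 0)
      = (((discount.drop (i + 1)).take 10).count k : Int) := by
  have hi : PySem.List.pyGetD discount (i : Int) "" = discount[i]'(by omega) := by
    rw [PySem.List.pyGetD_eq_getElem discount "" (by omega) (by omega)]
    simp
  have hj : PySem.List.pyGetD discount ((i : Int) + 10) "" = discount[i + 10]'(by omega) := by
    rw [show ((i : Int) + 10) = ((i + 10 : Nat) : Int) by push_cast; ring,
      PySem.List.pyGetD_eq_getElem discount "" (by omega) (by push_cast; omega)]
    simp only [Int.toNat_natCast]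
  rw [hi, hj, modify2_getD, hc k, window_roll discount i h k]

lemma checkA_eq_stepB (cnt : PySem.Dict String Int) (discount : List String)
    (pairs : List (String × Int)) (answer : Int) (i : Nat)
    (hc : ∀ k, cnt.getD k 0 = (((discount.drop i).take 10).count k : Int)) :
    (if checkA cnt pairs then answer + 1 else answer) = stepB discount pairs answer (i : Int) := by
  have hsl : PySem.List.slice discount (some (i : Int)) (some ((i : Int) + 10))
      = (discount.drop i).take 10 := by
    have h10 := PySem.List.slice_natCast_add discount i 10
    push_cast at h10
    exact h10
  have hw : ∀ k, cnt.getD k 0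
      = ((PySem.List.slice discount (some (i : Int)) (some ((i : Int) + 10))).foldl
          (fun d item => d.insert item (d.getD item 0 + 1)) PySem.Dict.empty).getD k 0 := by
    intro k
    rw [PySem.Dict.getD_foldl_insert_add_one, hsl, hc k]
    simp
  unfold stepB
  rw [check_congr cnt _ hw pairs]

-- main loop equivalence: A's rolling loop computes B's per-window fold, given the invariant
lemma loopA_eq (discount : List String) (pairs : List (String × Int)) :
    ∀ (n : Nat) (i : Nat) (answer : Int) (cnt : PySem.Dict String Int),
    (i : Int) = (discount.length : Int) - 9 - (n : Int) →
    i + 10 ≤ discount.length →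
    (∀ k, cnt.getD k 0 = (((discount.drop i).take 10).count k : Int)) →
    loopA discount pairs (PySem.List.pyRange (i : Int) ((discount.length : Int) - 9) 1) answer cnt
      = (PySem.List.pyRange (i : Int) ((discount.length : Int) - 9) 1).foldl
          (stepB discount pairs) answer := by
  intro n
  induction n with
  | zero => intro i answer cnt hn hfit hc; omega
  | succ m ih =>
    intro i answer cnt hn hfit hc
    have hlt : (i : Int) < (discount.length : Int) - 9 := by omega
    rw [PySem.List.pyRange_one_cons hlt]
    simp only [loopA, List.foldl_cons]
    rw [checkA_eq_stepB cnt discount pairs answer i hc]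
    by_cases hend : (discount.length : Int) ≤ (i : Int) + 10
    · rw [if_pos hend, PySem.List.pyRange_one_eq_nil (by omega), List.foldl_nil]
    · rw [if_neg hend]
      rw [show ((i : Int) + 1) = ((i + 1 : Nat) : Int) by push_cast; ring]
      exact ih (i + 1) _ _ (by omega) (by omega)
        (fun k => roll_getD cnt discount i (by omega) hc k)

-- ===== VERDICT (by name: the statement is the Claim_ definition above) =====
theorem solution_spec : Claim_equal_solution := by
  intro want number discount _ hpre
  have h10 : 10 ≤ discount.length := hpre
  have key := loopA_eq discount (want.zip number) (discount.length - 9) 0 0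
      ((PySem.List.pyRange 0 10 1).foldl
        (fun d i => d.modify (PySem.List.pyGetD discount i "") 0 (· + 1)) PySem.Dict.empty)
      (by omega) (by omega)
      (fun k => by rw [initA_getD discount h10 k]; simp)
  unfold Spec_solution
  exact key
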